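-- pv_equiv track=rewrite | github.com/sakshamzip2-sys/opencomputer | OpenComputer/opencomputer/gateway/streaming_chunker.py | _scan_fence
-- ===== SOURCE A (Python) =====
-- _FENCE = "```"
--
-- def _scan_fence(text: str) -> list[int]:
--     """Return positions of every ``\\`\\`\\``` in *text*."""
--     out: list[int] = []
--     i = 0
--     while True:
--         j = text.find(_FENCE, i)
--         if j < 0:
--             return out
--         out.append(j)
--         i = j + 3
-- ===== SOURCE B (Python) =====
-- def _scan_fence(text: str) -> list[int]:
--     """Return positions of every ``` in *text* (non-overlapping, left to right)."""
--     out: list[int] = []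
--     run = 0  # length of the current run of trailing backticks (capped at 3)
--     for idx, ch in enumerate(text):
--         if ch == '`':
--             run += 1
--             if run == 3:
--                 out.append(idx - 2)
--                 run = 0
--         else:
--             run = 0
--     return out
-- ===== Notes on version B (the rewrite author's own statement) =====
-- stated objective: alternative
-- what changed: Replaced the repeated str.find calls on the whole string with a single character-by-character pass that maintains a counter of consecutive backticks, recording a fence start and resetting the counter whenever it reaches 3.
import Mathlib
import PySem

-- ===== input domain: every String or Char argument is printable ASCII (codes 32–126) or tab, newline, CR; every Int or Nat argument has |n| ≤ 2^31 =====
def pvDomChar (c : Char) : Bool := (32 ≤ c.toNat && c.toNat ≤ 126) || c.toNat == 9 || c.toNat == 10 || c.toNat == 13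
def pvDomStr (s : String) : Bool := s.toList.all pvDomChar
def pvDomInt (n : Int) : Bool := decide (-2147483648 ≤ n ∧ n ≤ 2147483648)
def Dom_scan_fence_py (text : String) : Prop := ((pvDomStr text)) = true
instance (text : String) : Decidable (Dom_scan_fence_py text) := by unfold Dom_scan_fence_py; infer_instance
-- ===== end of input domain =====

-- B replaces A's repeated str.find scans with a single character pass keeping a
-- counter of consecutive backticks (objective: alternative decomposition, same cost).

-- ===== PORT A =====
-- A's 'while True' loop: j = text.find("```", i); stop if j < 0, else record j, i = j + 3.
-- fuel = len(text) + 1 bounds the iteration count (i strictly increases by ≥ 3 while ≤ len).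
def scanA_loop (text : String) (fuel : Nat) (i : Int) (out : List Int) : List Int :=
  match fuel with
  | 0 => out
  | fuel + 1 =>
    let j := PySem.Str.findFrom text "```" i
    if j < 0 then out
    else scanA_loop text fuel (j + 3) (out ++ [j])

def scan_fence_py (text : String) : List Int :=
  scanA_loop text (text.toList.length + 1) 0 []

-- ===== PORT B =====
-- Source B: for idx, ch in enumerate(text): maintain run of consecutive backticks,
-- record idx - 2 and reset when run hits 3.
def scanB_loop : List Char → Nat → Nat → List Int → List Int
  | [], _, _, out => out
  | c :: rest, idx, run, out =>
    if c = '`' then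
      if run + 1 = 3 then scanB_loop rest (idx + 1) 0 (out ++ [(idx : Int) - 2])
      else scanB_loop rest (idx + 1) (run + 1) out
    else scanB_loop rest (idx + 1) 0 out

def scan_fence_py_alt (text : String) : List Int :=
  scanB_loop text.toList 0 0 []

-- ===== PRECONDITION & SPEC =====
def Spec_scan_fence_py (text : String) (out : List Int) : Prop := out = scan_fence_py_alt text
instance (text : String) (out : List Int) : Decidable (Spec_scan_fence_py text out) := by unfold Spec_scan_fence_py; infer_instance

-- ===== CLAIM (what is proved, stated in full; the proofs are below) =====
def Claim_equal_scan_fence_py : Prop := ∀ (text : String), Dom_scan_fence_py text → Spec_scan_fence_py text (scan_fence_py text)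

-- ===== LEMMAS AND PROOFS =====

-- Reference function: positions of non-overlapping fences, scanning left to right.
def ref (cs : List Char) (i : Nat) : List Int :=
  match cs with
  | [] => []
  | c :: rest =>
    if (c :: rest).take 3 = ['`', '`', '`'] then (i : Int) :: ref (rest.drop 2) (i + 3)
    else ref rest (i + 1)
termination_by cs.length
decreasing_by all_goals (simp; try omega)

theorem ref_nil (i : Nat) : ref [] i = [] := by rw [ref.eq_def]

theorem ref_cons (c : Char) (rest : List Char) (i : Nat) :
    ref (c :: rest) i =
      if (c :: rest).take 3 = ['`', '`', '`'] then (i : Int) :: ref (rest.drop 2) (i + 3)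
      else ref rest (i + 1) := by
  conv_lhs => rw [ref.eq_def]

theorem fence_prefix_iff (d : List Char) :
    ['`', '`', '`'] <+: d ↔ d.take 3 = ['`', '`', '`'] := by
  constructor
  · rintro ⟨t, rfl⟩; rfl
  · intro h; exact h ▸ List.take_prefix 3 d

theorem ref_nil_of_not_infix (d : List Char) (i : Nat)
    (h : ¬ ['`', '`', '`'] <:+: d) : ref d i = [] := by
  induction d generalizing i with
  | nil => exact ref_nil i
  | cons c rest ih =>
    rw [ref]
    have hnp : ¬ (c :: rest).take 3 = ['`', '`', '`'] := by
      intro ht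
      exact h ((fence_prefix_iff _ |>.mpr ht).isInfix)
    rw [if_neg hnp]
    exact ih (i + 1) (fun hin => h (List.IsInfix.trans hin (List.suffix_cons c rest).isInfix))

theorem ref_skip (k : Nat) (d : List Char) (i : Nat)
    (h : ∀ m < k, ¬ ['`', '`', '`'] <+: d.drop m) :
    ref d i = ref (d.drop k) (i + k) := by
  induction k generalizing d i with
  | zero => simp
  | succ k ih =>
    cases d with
    | nil => simp [ref]
    | cons c rest =>
      have h0 : ¬ ['`', '`', '`'] <+: (c :: rest) := h 0 (Nat.succ_pos k)
      rw [ref_cons, if_neg (fun ht => h0 ((fence_prefix_iff _).mpr ht))]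
      have := ih rest (i + 1) (fun m hm => by
        have := h (m + 1) (by omega)
        simpa using this)
      rw [this]
      simp [Nat.add_assoc, Nat.add_comm 1 k]

theorem ref_fence (d : List Char) (i : Nat)
    (h : ['`', '`', '`'] <+: d) :
    ref d i = (i : Int) :: ref (d.drop 3) (i + 3) := by
  have ht := (fence_prefix_iff d).mp h
  cases d with
  | nil => simp at ht
  | cons c rest =>
    rw [ref_cons, if_pos ht]
    rfl

-- B's loop with zero counter computes ref; general invariant over the pending run.
theorem scanB_inv (cs : List Char) (idx run : Nat) (out : List Int)
    (hr : run ≤ 2) (hi : run ≤ idx) :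
    scanB_loop cs idx run out = out ++ ref (List.replicate run '`' ++ cs) (idx - run) := by
  induction cs generalizing idx run out with
  | nil =>
    interval_cases run <;> simp [scanB_loop, ref]
  | cons c rest ih =>
    by_cases hc : c = '`'
    · subst hc
      interval_cases run
      · rw [scanB_loop, if_pos rfl, if_neg (by omega)]
        have := ih (idx + 1) 1 out (by omega) (by omega)
        simpa using this
      · rw [scanB_loop, if_pos rfl, if_neg (by omega)]
        have := ih (idx + 1) 2 out (by omega) (by omega)
        rw [this]
        congr 1
      · rw [scanB_loop, if_pos rfl, if_pos rfl]
        have := ih (idx + 1) 0 (out ++ [(idx : Int) - 2]) (by omega) (by omega)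
        rw [this]
        rw [show List.replicate 2 '`' ++ '`' :: rest = '`' :: '`' :: '`' :: rest from rfl]
        rw [ref_cons, if_pos (show List.take 3 ('`' :: '`' :: '`' :: rest) = ['`', '`', '`'] from rfl)]
        rw [show List.drop 2 ('`' :: '`' :: rest) = rest from rfl]
        rw [show List.replicate 0 '`' ++ rest = rest from by simp]
        rw [show ((idx - 2 : Nat) : Int) = (idx : Int) - 2 from by omega]
        rw [show idx - 2 + 3 = idx + 1 - 0 from by omega]
        simp
    · rw [scanB_loop, if_neg hc]
      have := ih (idx + 1) 0 out (by omega) (by omega)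
      rw [this]
      congr 1
      -- ref (replicate run '`' ++ c :: rest) (idx - run) = ref rest (idx + 1)
      have hstep : ∀ r j, r ≤ 2 → ref (List.replicate r '`' ++ c :: rest) j = ref rest (j + r + 1) := by
        intro r j hr2
        interval_cases r
        · rw [show List.replicate 0 '`' ++ c :: rest = c :: rest from rfl]
          rw [ref_cons, if_neg (by simp [List.take]; intro h1; exact absurd h1 hc)]
        · rw [show List.replicate 1 '`' ++ c :: rest = '`' :: c :: rest from rfl]
          rw [ref_cons, if_neg (by simp [List.take]; intro h1; exact absurd h1 hc)]
          rw [ref_cons, if_neg (by simp [List.take]; intro h1; exact absurd h1 hc)]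
        · rw [show List.replicate 2 '`' ++ c :: rest = '`' :: '`' :: c :: rest from rfl]
          rw [ref_cons, if_neg (by simp [List.take]; intro h1; exact absurd h1 hc)]
          rw [ref_cons, if_neg (by simp [List.take]; intro h1; exact absurd h1 hc)]
          rw [ref_cons, if_neg (by simp [List.take]; intro h1; exact absurd h1 hc)]
      rw [hstep run (idx - run) hr]
      congr 1
      omega

-- A's loop computes ref on the remaining suffix.
theorem scanA_inv (text : String) (fuel i : Nat) (out : List Int)
    (hi : i ≤ text.toList.length) (hf : text.toList.length - i < fuel) :
    scanA_loop text fuel (i : Int) out = out ++ ref (text.toList.drop i) i := by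
  induction fuel generalizing i out with
  | zero => omega
  | succ fuel ih =>
    rw [scanA_loop]
    simp only [PySem.Str.findFrom_eq]
    rw [PySem.Chars.findFrom_natCast _ _ i hi]
    by_cases hfind : PySem.Chars.find (text.toList.drop i) "```".toList = -1
    · rw [if_pos hfind, if_pos (by norm_num)]
      have hni : ¬ "```".toList <:+: text.toList.drop i :=
        (PySem.Chars.find_eq_neg_one_iff _ _).mp hfind
      rw [ref_nil_of_not_infix _ i (by simpa using hni), List.append_nil]
    · rw [if_neg hfind]
      set f := PySem.Chars.find (text.toList.drop i) "```".toList with hfdef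
      have hinf : "```".toList <:+: text.toList.drop i := by
        have := (PySem.Chars.find_ne_neg_one_iff (text.toList.drop i) "```".toList).mp hfind
        exact this
      have hf0 : 0 ≤ f := (PySem.Chars.find_nonneg_iff _ _).mpr hinf
      have hspec := PySem.Chars.find_spec (s := text.toList.drop i) (sub := "```".toList) hf0
      obtain ⟨hpre, hmin⟩ := hspec
      have hjpos : ¬ ((i : Int) + f < 0) := by omega
      rw [if_neg hjpos]
      -- the fence found at drop (i + f.toNat) fits inside the string
      have hpre' : ['`', '`', '`'] <+: text.toList.drop (i + f.toNat) := by
        have h2 : ['`', '`', '`'] <+: List.drop f.toNat (List.drop i text.toList) := hpre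
        rw [List.drop_drop] at h2
        exact h2
      have hlen3 : i + f.toNat + 3 ≤ text.toList.length := by
        have h3 := hpre'.length_le
        rw [List.length_drop] at h3
        simp only [List.length_cons, List.length_nil] at h3
        omega
      have hrec := ih (i + f.toNat + 3) (out ++ [(i : Int) + f]) hlen3 (by omega)
      have hcast : (i : Int) + f + 3 = ((i + f.toNat + 3 : Nat) : Int) := by
        push_cast; omega
      rw [hcast, hrec]
      -- now rewrite ref (drop i) i
      have hskip := ref_skip f.toNat (text.toList.drop i) i (fun m hm => by
        have := hmin m hm
        simpa using this)
      have hdd : List.drop f.toNat (List.drop i text.toList) = List.drop (i + f.toNat) text.toList := by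
        rw [List.drop_drop, Nat.add_comm]
      have hdd3 : List.drop 3 (List.drop (i + f.toNat) text.toList)
          = List.drop (i + f.toNat + 3) text.toList := by
        rw [List.drop_drop, Nat.add_comm]
      rw [hskip, hdd, ref_fence _ _ hpre', hdd3]
      rw [show ((i + f.toNat : Nat) : Int) = (i : Int) + f from by omega]
      simp

-- ===== VERDICT (by name: the statement is the Claim_ definition above) =====
theorem scan_fence_py_spec : Claim_equal_scan_fence_py := by
  intro text _
  unfold Spec_scan_fence_py scan_fence_py scan_fence_py_alt
  rw [show (0 : Int) = ((0 : Nat) : Int) from rfl]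
  rw [scanA_inv text (text.toList.length + 1) 0 [] (by omega) (by omega)]
  rw [scanB_inv text.toList 0 0 [] (by omega) (by omega)]
  simp
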